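-- pv_equiv track=rewrite | github.com/Heipiao/didi | analysis_data.py | what_time_missed
-- ===== SOURCE A (Python) =====
-- def what_time_missed(df_time):
--     normal_time_slice = list(range(1, 145))
--     for time_slice in df_time:
--         if time_slice in normal_time_slice:
--             normal_time_slice.remove(time_slice)
--     if normal_time_slice:
--         return normal_time_slice
--     else:
--         return None
-- ===== SOURCE B (Python) =====
-- def what_time_missed(df_time):
--     seen = set(df_time)
--     result = [t for t in range(1, 145) if t not in seen]
--     return result if result else None
-- ===== Notes on version B (the rewrite author's own statement) =====
-- stated objective: faster
-- what changed: Instead of mutating a candidate list while scanning the input (with a linear membership test and remove per element), B builds a set of the input once and filters the fixed range 1..144 in a single comprehension.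
import Mathlib
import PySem

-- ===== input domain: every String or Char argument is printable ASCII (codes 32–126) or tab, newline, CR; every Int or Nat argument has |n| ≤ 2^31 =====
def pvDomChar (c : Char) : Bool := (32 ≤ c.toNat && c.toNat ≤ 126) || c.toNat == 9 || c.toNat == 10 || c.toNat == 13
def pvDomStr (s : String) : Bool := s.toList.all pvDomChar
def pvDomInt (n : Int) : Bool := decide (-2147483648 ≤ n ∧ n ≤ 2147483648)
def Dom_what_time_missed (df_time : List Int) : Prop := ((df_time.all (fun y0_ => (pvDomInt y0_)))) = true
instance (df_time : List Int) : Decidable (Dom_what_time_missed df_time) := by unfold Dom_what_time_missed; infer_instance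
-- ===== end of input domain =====

-- B builds a set of the input once and filters the fixed range 1..144, instead of A's mutate-while-scanning loop.


-- ===== PORT A =====
def what_time_missed (df_time : List Int) : Option (List Int) :=
  let normal_time_slice :=
    df_time.foldl
      (fun st time_slice =>
        if time_slice ∈ st then (PySem.List.remove? st time_slice).getD st else st)
      (PySem.List.pyRange 1 145 1)
  if normal_time_slice ≠ [] then some normal_time_slice else none

-- ===== PORT B =====
def what_time_missed_alt (df_time : List Int) : Option (List Int) :=
  let seen : PySem.Set Int := PySem.Set.ofList df_time
  let result := (PySem.List.pyRange 1 145 1).filter (fun t => !(PySem.Set.contains seen t))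
  if result ≠ [] then some result else none

-- ===== PRECONDITION & SPEC =====
def Spec_what_time_missed (df_time : List Int) (out : Option (List Int)) : Prop := out = what_time_missed_alt df_time
instance (df_time : List Int) (out : Option (List Int)) : Decidable (Spec_what_time_missed df_time out) := by unfold Spec_what_time_missed; infer_instance

-- ===== CLAIM (what is proved, stated in full; the proofs are below) =====
def Claim_equal_what_time_missed : Prop := ∀ (df_time : List Int), Dom_what_time_missed df_time → Spec_what_time_missed df_time (what_time_missed df_time)

-- ===== LEMMAS AND PROOFS =====

-- A's loop step: whether or not the element is present, it is l.erase t.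
theorem pv_step_eq_erase (l : List Int) (t : Int) :
    (if t ∈ l then (PySem.List.remove? l t).getD l else l) = l.erase t := by
  by_cases h : t ∈ l
  · simp [h, PySem.List.remove?_eq_some_erase l t h]
  · simp [h, List.erase_of_not_mem h]

-- A's whole loop on a duplicate-free start list is a filter by non-membership in df.
theorem pv_foldl_eq_filter (df : List Int) :
    ∀ (l : List Int), l.Nodup →
      df.foldl (fun st t => if t ∈ st then (PySem.List.remove? st t).getD st else st) l
        = l.filter (fun x => decide (x ∉ df)) := by
  induction df with
  | nil => intro l _; simp
  | cons t rest ih =>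
    intro l hl
    have : (t :: rest).foldl (fun st t => if t ∈ st then (PySem.List.remove? st t).getD st else st) l
        = rest.foldl (fun st t => if t ∈ st then (PySem.List.remove? st t).getD st else st) (l.erase t) := by
      simp [List.foldl_cons, pv_step_eq_erase]
    rw [this, ih (l.erase t) (hl.erase t), hl.erase_eq_filter t, List.filter_filter]
    apply List.filter_congr
    intro x _
    by_cases hx : x = t <;> simp [hx]

-- ===== VERDICT (by name: the statement is the Claim_ definition above) =====
theorem what_time_missed_spec : Claim_equal_what_time_missed := by
  intro df _
  unfold Spec_what_time_missed what_time_missed what_time_missed_alt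
  rw [pv_foldl_eq_filter df _ (PySem.List.nodup_pyRange_one 1 145)]
  have : ((PySem.List.pyRange 1 145 1).filter (fun x => decide (x ∉ df)))
      = ((PySem.List.pyRange 1 145 1).filter (fun t => !(PySem.Set.contains (PySem.Set.ofList df) t))) := by
    apply List.filter_congr
    intro x _
    simp [PySem.Set.contains, PySem.Set.mem_ofList]
  simp only [this]
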